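-- pv_equiv track=rewrite | github.com/Hana-Perman/Arnoldova-macka | funkcija.py | identiteta
-- ===== SOURCE A (Python) =====
-- def preslikava (x1,x2,n):
--         list_1 = [2,1]
--         list_2 = [1,1]
--         y1 = ((list_1 [0] * x1) + (list_1[1]*x2)) % n
--         y2 = ((list_2[0] * x1 ) + (list_2[1]*x2)) % n
--         return y1, y2
--
-- def identiteta (n):
--     #DEFINICIJE
--     #tri tabele, ki imajo povsod ničle
--     bazna_mreža = [[0 for _ in range(n)] for _ in range(n)]
--     mreža = [[0 for _ in range(n)] for _ in range(n)]
--     nova_mreža = [[0 for _ in range(n)] for _ in range(n)]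
--     a=0
--     števec=0
--
--     #vpišem vrednosti v tabelo mreža in bazna mreža, ki sta v izhodišču enake
--     for i in range (n):
--         for j in range (n):
--             bazna_mreža[i][j]  = a
--             mreža[i][j] = a
--             a+=1
--
--     #IZVAJANJE PROGRAMA
--     while True:
--         števec+=1
--         for i in range (n):
--             for j in range (n):
--                 vrednost = mreža[i][j] #vsako mesto v tabeli ima vrednost, ki jo shranim
--                 y1,y2= preslikava(i, j,n) #točko preslikam; točka SPREMENI KOORDINATE ampak OHRANI VREDNOST
--                 nova_mreža [y1][y2] = vrednost #mreža po preslikavi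
--         if nova_mreža == bazna_mreža:#če je preslikana mreža enaka bazni končam
--             break
--         else: #če ni enaka bazni
--             for g in range (n):
--                 for h in range (n):
--                     mreža[g][h] = nova_mreža[g][h] #če ne nadaljujem preslikovanje
--
--     return števec
-- ===== SOURCE B (Python) =====
-- def identiteta(n):
--     # Smallest k >= 1 with M^k == I (mod n), M = [[2,1],[1,1]]: the period of the
--     # Arnold cat map on the n x n torus, found by iterating 2x2 matrix products mod n
--     # instead of permuting the whole n^2 grid.
--     if n <= 1:
--         return 1
--     a, b, c, d = 2 % n, 1, 1, 1
--     k = 1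
--     while (a, b, c, d) != (1, 0, 0, 1):
--         a, b, c, d = (2 * a + c) % n, (2 * b + d) % n, (a + c) % n, (b + d) % n
--         k += 1
--     return k
-- ===== Notes on version B (the rewrite author's own statement) =====
-- stated objective: faster
-- what changed: B finds the smallest k with [[2,1],[1,1]]^k = I (mod n) by iterating a 2x2 matrix product mod n, instead of A's permuting all n^2 grid cells each iteration and comparing whole grids.
import Mathlib
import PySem

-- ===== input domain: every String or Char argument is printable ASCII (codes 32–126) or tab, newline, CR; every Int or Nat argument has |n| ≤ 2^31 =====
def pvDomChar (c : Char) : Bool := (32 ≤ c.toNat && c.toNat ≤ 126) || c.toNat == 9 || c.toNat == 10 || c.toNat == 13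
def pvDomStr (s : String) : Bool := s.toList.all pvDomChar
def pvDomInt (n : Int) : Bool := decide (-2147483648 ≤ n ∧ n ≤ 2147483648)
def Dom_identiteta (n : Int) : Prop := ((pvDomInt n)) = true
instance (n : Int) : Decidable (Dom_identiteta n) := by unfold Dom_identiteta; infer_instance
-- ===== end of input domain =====

-- B replaces A's grid-permutation loop (all n² cells moved and compared each round) by
-- iterating a 2×2 matrix product mod n until it reaches the identity: same value, faster.

-- ===== PORT A =====
-- read g[i][j] (exact for the in-range non-negative indices the program uses)
def rd (g : List (List Int)) (i j : Int) : Int :=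
  PySem.List.pyGetD (PySem.List.pyGetD g i []) j 0

-- write g[i][j] = v (exact for the in-range non-negative indices the program uses)
def wr (g : List (List Int)) (i j v : Int) : List (List Int) :=
  g.set i.toNat ((PySem.List.pyGetD g i []).set j.toNat v)

def preslikava (x1 x2 n : Int) : Int × Int :=
  let list_1 : List Int := [2, 1]
  let list_2 : List Int := [1, 1]
  let y1 := PySem.Int.mod (PySem.List.pyGetD list_1 0 0 * x1 + PySem.List.pyGetD list_1 1 0 * x2) n
  let y2 := PySem.Int.mod (PySem.List.pyGetD list_2 0 0 * x1 + PySem.List.pyGetD list_2 1 0 * x2) n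
  (y1, y2)

-- [[0 for _ in range(n)] for _ in range(n)]
def zeros (n : Int) : List (List Int) :=
  (PySem.List.pyRange 0 n 1).map (fun _ => (PySem.List.pyRange 0 n 1).map (fun _ => (0 : Int)))

-- the first double loop: fills bazna_mreža and mreža, threading the counter a
def fillA (n : Int) : List (List Int) × List (List Int) × Int :=
  (PySem.List.pyRange 0 n 1).foldl (fun st i =>
    (PySem.List.pyRange 0 n 1).foldl (fun st j =>
      (wr st.1 i j st.2.2, wr st.2.1 i j st.2.2, st.2.2 + 1)) st) (zeros n, zeros n, 0)

-- one pass of the while-loop body: nova_mreža[y1][y2] = mreža[i][j]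
def stepA (n : Int) (m no : List (List Int)) : List (List Int) :=
  (PySem.List.pyRange 0 n 1).foldl (fun no i =>
    (PySem.List.pyRange 0 n 1).foldl (fun no j =>
      let vrednost := rd m i j
      let y := preslikava i j n
      wr no y.1 y.2 vrednost) no) no

-- the else-branch double loop: mreža[g][h] = nova_mreža[g][h]
def copyA (n : Int) (no m : List (List Int)) : List (List Int) :=
  (PySem.List.pyRange 0 n 1).foldl (fun m g =>
    (PySem.List.pyRange 0 n 1).foldl (fun m h => wr m g h (rd no g h)) m) m

-- the 'while True' loop; the fuel argument only makes it total (Python never exhausts it)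
def loopA (n : Int) (bazna : List (List Int)) :
    Nat → List (List Int) → List (List Int) → Int → Int
  | 0, _, _, c => c
  | fuel + 1, m, no, c =>
      let c' := c + 1
      let no' := stepA n m no
      if no' = bazna then c' else loopA n bazna fuel (copyA n no' m) no' c'

def identiteta (n : Int) : Int :=
  let st := fillA n
  loopA n st.1 (n.toNat ^ 4 + 1) st.2.1 (zeros n) 0

-- ===== PORT B =====
def matStep (n a b c d : Int) : Int × Int × Int × Int :=
  (PySem.Int.mod (2 * a + c) n, PySem.Int.mod (2 * b + d) n,
   PySem.Int.mod (a + c) n, PySem.Int.mod (b + d) n)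

-- the 'while (a,b,c,d) != (1,0,0,1)' loop; the fuel argument only makes it total
def loopB (n : Int) : Nat → Int × Int × Int × Int → Int → Int
  | 0, _, k => k
  | fuel + 1, st, k =>
      if st = (1, 0, 0, 1) then k
      else loopB n fuel (matStep n st.1 st.2.1 st.2.2.1 st.2.2.2) (k + 1)

def identiteta_alt (n : Int) : Int :=
  if n ≤ 1 then 1
  else loopB n (n.toNat ^ 4) (PySem.Int.mod 2 n, 1, 1, 1) 1

-- ===== PRECONDITION & SPEC =====
def Spec_identiteta (n : Int) (out : Int) : Prop := out = identiteta_alt n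
instance (n : Int) (out : Int) : Decidable (Spec_identiteta n out) := by unfold Spec_identiteta; infer_instance

-- ===== CLAIM (what is proved, stated in full; the proofs are below) =====
def Claim_equal_identiteta : Prop := ∀ (n : Int), Dom_identiteta n → Spec_identiteta n (identiteta n)

-- ===== LEMMAS AND PROOFS =====

-- (i,j) lies in the n×n square
def Sq (n i j : Int) : Prop := 0 ≤ i ∧ i < n ∧ 0 ≤ j ∧ j < n

-- g is an n×n grid
def Grid (n : Int) (g : List (List Int)) : Prop :=
  g.length = n.toNat ∧ ∀ r ∈ g, r.length = n.toNat

-- the cat map as a function on points (the very computation preslikava performs)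
def sig (n : Int) (p : Int × Int) : Int × Int := preslikava p.1 p.2 n

def sigIt (n : Int) : Nat → Int × Int → Int × Int
  | 0, p => p
  | k + 1, p => sig n (sigIt n k p)

lemma sig_eq (n : Int) (hn : 0 < n) (p : Int × Int) :
    sig n p = ((2 * p.1 + p.2) % n, (p.1 + p.2) % n) := by
  simp [sig, preslikava, PySem.List.pyGetD, PySem.Int.mod_eq_emod_of_pos hn]

lemma sig_sq (n : Int) (hn : 0 < n) (p : Int × Int) (hp : Sq n p.1 p.2) :
    Sq n (sig n p).1 (sig n p).2 := by
  rw [sig_eq n hn]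
  exact ⟨Int.emod_nonneg _ (by omega), Int.emod_lt_of_pos _ hn,
         Int.emod_nonneg _ (by omega), Int.emod_lt_of_pos _ hn⟩

lemma sigIt_sq (n : Int) (hn : 0 < n) (k : Nat) (p : Int × Int) (hp : Sq n p.1 p.2) :
    Sq n (sigIt n k p).1 (sigIt n k p).2 := by
  induction k with
  | zero => exact hp
  | succ k ih => exact sig_sq n hn _ ih

lemma sig_inj (n : Int) (hn : 0 < n) (p q : Int × Int)
    (hp : Sq n p.1 p.2) (hq : Sq n q.1 q.2) (h : sig n p = sig n q) : p = q := by
  obtain ⟨hp0, hp1, hp2, hp3⟩ := hp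
  obtain ⟨hq0, hq1, hq2, hq3⟩ := hq
  rw [sig_eq n hn, sig_eq n hn] at h
  obtain ⟨h1, h2⟩ := Prod.ext_iff.mp h
  simp only at h1 h2
  have m1 : (2 * p.1 + p.2) ≡ (2 * q.1 + q.2) [ZMOD n] := h1
  have m2 : (p.1 + p.2) ≡ (q.1 + q.2) [ZMOD n] := h2
  have m3 : p.1 % n = q.1 % n := by
    have h3 := m1.sub m2
    have e1 : 2 * p.1 + p.2 - (p.1 + p.2) = p.1 := by ring
    have e2 : 2 * q.1 + q.2 - (q.1 + q.2) = q.1 := by ring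
    rwa [e1, e2] at h3
  have e3 : p.1 = q.1 := by
    rwa [Int.emod_eq_of_lt hp0 hp1, Int.emod_eq_of_lt hq0 hq1] at m3
  have m4 : p.2 % n = q.2 % n := by
    have h4 := m2.sub (Int.ModEq.refl p.1)
    rw [e3] at h4
    rwa [show q.1 + p.2 - q.1 = p.2 by ring, show q.1 + q.2 - q.1 = q.2 by ring] at h4
  have e4 : p.2 = q.2 := by
    rwa [Int.emod_eq_of_lt hp2 hp3, Int.emod_eq_of_lt hq2 hq3] at m4
  exact Prod.ext e3 e4

lemma emod_lin (n x y i j : Int) :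
    ((x % n) * i + (y % n) * j) % n = (x * i + y * j) % n := by
  have hx : (x % n) ≡ x [ZMOD n] := Int.emod_emod x n
  have hy : (y % n) ≡ y [ZMOD n] := Int.emod_emod y n
  exact (hx.mul_right i).add (hy.mul_right j)

-- encoding (i,j) ↦ i*n+j is injective on the square
lemma encEq (n p q i j : Int) (hp : Sq n p q) (hi : Sq n i j)
    (h : p * n + q = i * n + j) : p = i ∧ q = j := by
  obtain ⟨hp0, hp1, hq0, hq1⟩ := hp
  obtain ⟨hi0, hi1, hj0, hj1⟩ := hi
  have h1 : (p - i) * n = j - q := by linear_combination h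
  have hpi : p = i := by
    rcases lt_trichotomy p i with hlt | heq | hgt
    · nlinarith
    · exact heq
    · nlinarith
  refine ⟨hpi, by linarith [h, hpi ▸ h]⟩

lemma getD_set_eq {α : Type} (l : List α) (m : Nat) (x d : α) (h : m < l.length) :
    (l.set m x).getD m d = x := by
  rw [List.getD_eq_getElem _ _ (by simpa using h)]
  simp [List.getElem_set_self]

lemma getD_set_ne {α : Type} (l : List α) (m k : Nat) (x d : α) (h : k ≠ m) :
    (l.set m x).getD k d = l.getD k d := by
  simp [List.getD_eq_getElem?_getD, List.getElem?_set_ne (by omega : m ≠ k)]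

lemma rd_eq (g : List (List Int)) (p q : Int) (hp : 0 ≤ p) (hq : 0 ≤ q) :
    rd g p q = (g.getD p.toNat []).getD q.toNat 0 := by
  rw [rd, PySem.List.pyGetD_of_nonneg _ _ hp, PySem.List.pyGetD_of_nonneg _ _ hq]

lemma row_len (n : Int) {g : List (List Int)} (hg : Grid n g) {a : Nat}
    (ha : a < g.length) : (g.getD a []).length = n.toNat := by
  rw [List.getD_eq_getElem _ _ ha]
  exact hg.2 _ (List.getElem_mem ha)

lemma wr_Grid (n : Int) {g : List (List Int)} (hg : Grid n g) {a b : Int}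
    (hab : Sq n a b) (v : Int) : Grid n (wr g a b v) := by
  obtain ⟨ha0, ha1, hb0, hb1⟩ := hab
  obtain ⟨hl, hr⟩ := hg
  constructor
  · simp [wr, hl]
  · intro r hrm
    rcases List.mem_or_eq_of_mem_set hrm with h | h
    · exact hr _ h
    · subst h
      rw [List.length_set, PySem.List.pyGetD_of_nonneg _ _ ha0]
      exact row_len n ⟨hl, hr⟩ (by omega)

lemma rd_wr (n : Int) {g : List (List Int)} (hg : Grid n g) {a b : Int}
    (hab : Sq n a b) (v : Int) {p q : Int} (hpq : Sq n p q) :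
    rd (wr g a b v) p q = if p = a ∧ q = b then v else rd g p q := by
  obtain ⟨ha0, ha1, hb0, hb1⟩ := hab
  obtain ⟨hp0, hp1, hq0, hq1⟩ := hpq
  have hlen : g.length = n.toNat := hg.1
  have haL : a.toNat < g.length := by omega
  have hrow : (g.getD a.toNat []).length = n.toNat := row_len n hg haL
  rw [rd_eq _ _ _ hp0 hq0, wr, PySem.List.pyGetD_of_nonneg _ _ ha0]
  by_cases hpa : p = a
  · subst hpa
    rw [getD_set_eq _ _ _ _ (by omega)]
    by_cases hqb : q = b
    · subst hqb
      rw [getD_set_eq _ _ _ _ (by omega)]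
      simp
    · rw [getD_set_ne _ _ _ _ _ (by omega), if_neg (by tauto), rd_eq _ _ _ hp0 hq0]
  · rw [getD_set_ne _ _ _ _ _ (by omega), if_neg (by tauto), rd_eq _ _ _ hp0 hq0]

lemma grid_ext (n : Int) {g h : List (List Int)} (hg : Grid n g) (hh : Grid n h)
    (he : ∀ p q : Int, Sq n p q → rd g p q = rd h p q) : g = h := by
  obtain ⟨hgl, hgr⟩ := hg
  obtain ⟨hhl, hhr⟩ := hh
  apply List.ext_getElem (by rw [hgl, hhl])
  intro k hk1 hk2
  have hrg : g[k].length = n.toNat := hgr _ (List.getElem_mem hk1)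
  have hrh : h[k].length = n.toNat := hhr _ (List.getElem_mem hk2)
  apply List.ext_getElem (by rw [hrg, hrh])
  intro l hl1 hl2
  have hsq : Sq n (k : Int) (l : Int) := ⟨by omega, by omega, by omega, by omega⟩
  have hrd := he (k : Int) (l : Int) hsq
  rw [rd_eq _ _ _ (by omega) (by omega), rd_eq _ _ _ (by omega) (by omega)] at hrd
  simp only [Int.toNat_natCast] at hrd
  rw [List.getD_eq_getElem _ _ hk1, List.getD_eq_getElem _ _ hk2,
      List.getD_eq_getElem _ _ hl1, List.getD_eq_getElem _ _ hl2] at hrd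
  exact hrd

-- nested for-loops are a fold over the list of index pairs
lemma foldl_nested {α β : Type} (L1 L2 : List α) (f : β → α → α → β) (init : β) :
    L1.foldl (fun acc i => L2.foldl (fun acc j => f acc i j) acc) init
      = (L1.flatMap (fun i => L2.map (fun j => (i, j)))).foldl
          (fun acc p => f acc p.1 p.2) init := by
  induction L1 generalizing init with
  | nil => rfl
  | cons x xs ih => simp [List.foldl_append, List.foldl_map, ih]

def pairs (n : Int) : List (Int × Int) :=
  (PySem.List.pyRange 0 n 1).flatMap (fun i => (PySem.List.pyRange 0 n 1).map (fun j => (i, j)))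

lemma mem_pairs (n : Int) (p : Int × Int) : p ∈ pairs n ↔ Sq n p.1 p.2 := by
  cases p with
  | mk i j =>
    simp [pairs, List.mem_flatMap, PySem.List.mem_pyRange_one, Sq]
    tauto

-- reading back a batch of writes at pairwise-distinct target cells
lemma writesF (n : Int) (F : Int × Int → Int × Int) (V : Int × Int → Int)
    (hF : ∀ p, Sq n p.1 p.2 → Sq n (F p).1 (F p).2)
    (hinj : ∀ p q, Sq n p.1 p.2 → Sq n q.1 q.2 → F p = F q → p = q)
    (ps : List (Int × Int)) (hps : ∀ p ∈ ps, Sq n p.1 p.2)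
    {g : List (List Int)} (hg : Grid n g) :
    Grid n (ps.foldl (fun g p => wr g (F p).1 (F p).2 (V p)) g) ∧
      ∀ p ∈ ps, rd (ps.foldl (fun g p => wr g (F p).1 (F p).2 (V p)) g) (F p).1 (F p).2 = V p := by
  induction ps using List.reverseRecOn with
  | nil => exact ⟨hg, by simp⟩
  | append_singleton ps q ih =>
    have hq : Sq n q.1 q.2 := hps q (by simp)
    obtain ⟨hG, hreads⟩ := ih (fun p hp => hps p (by simp [hp]))
    rw [List.foldl_append]
    simp only [List.foldl_cons, List.foldl_nil]
    refine ⟨wr_Grid n hG (hF q hq) _, ?_⟩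
    intro p hp
    rw [rd_wr n hG (hF q hq) _ (hF p (hps p hp))]
    rcases List.mem_append.mp hp with hp' | hp'
    · by_cases hc : (F p).1 = (F q).1 ∧ (F p).2 = (F q).2
      · have : p = q := hinj p q (hps p hp) hq (Prod.ext hc.1 hc.2)
        subst this
        simp
      · rw [if_neg hc]
        exact hreads p hp'
    · have : p = q := by simpa using hp'
      subst this
      simp

lemma zeros_Grid (n : Int) : Grid n (zeros n) := by
  constructor
  · simp [zeros, PySem.List.length_pyRange_one]
  · intro r hr
    simp [zeros] at hr
    obtain ⟨_, _, rfl⟩ := hr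
    simp [PySem.List.length_pyRange_one]

-- ===== invariants =====

def InvA (n : Int) (k : Nat) (m : List (List Int)) : Prop :=
  Grid n m ∧ ∀ i j, Sq n i j → rd m (sigIt n k (i, j)).1 (sigIt n k (i, j)).2 = i * n + j

def InvB (n : Int) (k : Nat) (st : Int × Int × Int × Int) : Prop :=
  (0 ≤ st.1 ∧ st.1 < n ∧ 0 ≤ st.2.1 ∧ st.2.1 < n ∧ 0 ≤ st.2.2.1 ∧ st.2.2.1 < n ∧
    0 ≤ st.2.2.2 ∧ st.2.2.2 < n) ∧
  ∀ i j, Sq n i j → sigIt n k (i, j) =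
    ((st.1 * i + st.2.1 * j) % n, (st.2.2.1 * i + st.2.2.2 * j) % n)

lemma stepA_eq (n : Int) (m no : List (List Int)) :
    stepA n m no = (pairs n).foldl
      (fun no p => wr no (sig n p).1 (sig n p).2 (rd m p.1 p.2)) no := by
  rw [stepA, foldl_nested]
  rfl

lemma copyA_eq (n : Int) (no m : List (List Int)) :
    copyA n no m = (pairs n).foldl
      (fun m p => wr m p.1 p.2 (rd no p.1 p.2)) m := by
  rw [copyA, foldl_nested]
  rfl

lemma stepA_char (n : Int) (hn : 0 < n) {k : Nat} {m no : List (List Int)}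
    (hA : InvA n k m) (hno : Grid n no) : InvA n (k + 1) (stepA n m no) := by
  rw [stepA_eq]
  have h := writesF n (sig n) (fun p => rd m p.1 p.2)
    (fun p hp => sig_sq n hn p hp) (fun p q hp hq => sig_inj n hn p q hp hq)
    (pairs n) (fun p hp => (mem_pairs n p).mp hp) hno
  refine ⟨h.1, ?_⟩
  intro i j hij
  have hsq := sigIt_sq n hn k (i, j) hij
  have := h.2 (sigIt n k (i, j)) ((mem_pairs n _).mpr hsq)
  simpa [sigIt] using this.trans (hA.2 i j hij)

lemma copyA_char (n : Int) (hn : 0 < n) {k : Nat} {no m : List (List Int)}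
    (hno : InvA n k no) (hm : Grid n m) : InvA n k (copyA n no m) := by
  rw [copyA_eq]
  have h := writesF n (fun p => p) (fun p => rd no p.1 p.2)
    (fun p hp => hp) (fun p q _ _ h => h)
    (pairs n) (fun p hp => (mem_pairs n p).mp hp) hm
  refine ⟨h.1, ?_⟩
  intro i j hij
  have hsq := sigIt_sq n hn k (i, j) hij
  have := h.2 (sigIt n k (i, j)) ((mem_pairs n _).mpr hsq)
  simpa using this.trans (hno.2 i j hij)

lemma matStep_char (n : Int) (hn : 0 < n) {k : Nat} {st : Int × Int × Int × Int}
    (hB : InvB n k st) :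
    InvB n (k + 1) (matStep n st.1 st.2.1 st.2.2.1 st.2.2.2) := by
  obtain ⟨a, b, c, d⟩ := st
  obtain ⟨⟨ha0, ha1, hb0, hb1, hc0, hc1, hd0, hd1⟩, hmap⟩ := hB
  simp only [matStep, PySem.Int.mod_eq_emod_of_pos hn]
  constructor
  · exact ⟨Int.emod_nonneg _ (by omega), Int.emod_lt_of_pos _ hn,
      Int.emod_nonneg _ (by omega), Int.emod_lt_of_pos _ hn,
      Int.emod_nonneg _ (by omega), Int.emod_lt_of_pos _ hn,
      Int.emod_nonneg _ (by omega), Int.emod_lt_of_pos _ hn⟩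
  · intro i j hij
    have hk := hmap i j hij
    show sig n (sigIt n k (i, j)) = _
    rw [hk, sig_eq n hn]
    simp only
    have hX : ((a * i + b * j) % n) ≡ a * i + b * j [ZMOD n] := Int.emod_emod _ n
    have hY : ((c * i + d * j) % n) ≡ c * i + d * j [ZMOD n] := Int.emod_emod _ n
    refine Prod.ext ?_ ?_
    · show (2 * ((a * i + b * j) % n) + (c * i + d * j) % n) % n = _
      calc (2 * ((a * i + b * j) % n) + (c * i + d * j) % n) % n
          = (2 * (a * i + b * j) + (c * i + d * j)) % n := (hX.mul_left 2).add hY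
        _ = ((2 * a + c) * i + (2 * b + d) * j) % n := by ring_nf
        _ = ((2 * a + c) % n * i + (2 * b + d) % n * j) % n := (emod_lin n _ _ i j).symm
    · show ((a * i + b * j) % n + (c * i + d * j) % n) % n = _
      calc ((a * i + b * j) % n + (c * i + d * j) % n) % n
          = ((a * i + b * j) + (c * i + d * j)) % n := hX.add hY
        _ = ((a + c) * i + (b + d) * j) % n := by ring_nf
        _ = ((a + c) % n * i + (b + d) % n * j) % n := (emod_lin n _ _ i j).symm

-- ===== the loop conditions are both "σ^k fixes the square" =====

lemma condA_iff (n : Int) (hn : 0 < n) {k : Nat} {nova bazna : List (List Int)}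
    (hA : InvA n k nova) (hbz : Grid n bazna)
    (hbr : ∀ i j, Sq n i j → rd bazna i j = i * n + j) :
    nova = bazna ↔ ∀ i j, Sq n i j → sigIt n k (i, j) = (i, j) := by
  constructor
  · intro heq i j hij
    have hsq := sigIt_sq n hn k (i, j) hij
    have h := hA.2 i j hij
    rw [heq, hbr _ _ hsq] at h
    obtain ⟨h1, h2⟩ := encEq n _ _ i j hsq hij h
    exact Prod.ext h1 h2
  · intro hfix
    apply grid_ext n hA.1 hbz
    intro p q hpq
    have h := hA.2 p q hpq
    rw [hfix p q hpq] at h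
    rw [h, hbr p q hpq]

lemma condB_iff (n : Int) (hn2 : 2 ≤ n) {k : Nat} {st : Int × Int × Int × Int}
    (hB : InvB n k st) :
    st = (1, 0, 0, 1) ↔ ∀ i j, Sq n i j → sigIt n k (i, j) = (i, j) := by
  have hn : 0 < n := by omega
  obtain ⟨a, b, c, d⟩ := st
  obtain ⟨⟨ha0, ha1, hb0, hb1, hc0, hc1, hd0, hd1⟩, hmap⟩ := hB
  constructor
  · intro heq i j hij
    obtain ⟨hi0, hi1, hj0, hj1⟩ := hij
    injection heq with h1 h2
    injection h2 with h2 h3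
    injection h3 with h3 h4
    rw [hmap i j ⟨hi0, hi1, hj0, hj1⟩]
    subst h1; subst h2; subst h3; subst h4
    simp [Int.emod_eq_of_lt hi0 hi1, Int.emod_eq_of_lt hj0 hj1]
  · intro hfix
    have h10 := hfix 1 0 ⟨by omega, by omega, by omega, by omega⟩
    have h01 := hfix 0 1 ⟨by omega, by omega, by omega, by omega⟩
    rw [hmap 1 0 ⟨by omega, by omega, by omega, by omega⟩] at h10
    rw [hmap 0 1 ⟨by omega, by omega, by omega, by omega⟩] at h01
    simp only [mul_one, mul_zero, add_zero, zero_add] at h10 h01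
    rw [Int.emod_eq_of_lt ha0 ha1, Int.emod_eq_of_lt hc0 hc1] at h10
    rw [Int.emod_eq_of_lt hb0 hb1, Int.emod_eq_of_lt hd0 hd1] at h01
    injection h10 with e1 e2
    injection h01 with e3 e4
    simp_all

-- ===== fill characterization =====

lemma fill_inner (n : Int) (hn : 0 < n) (t : Int) (ht0 : 0 ≤ t) (ht1 : t < n) :
    ∀ (v : Nat), (v : Int) ≤ n → ∀ (b m : List (List Int)) (a0 : Int),
      Grid n b → Grid n m →
      (Grid n ((PySem.List.pyRange 0 (v : Int) 1).foldl
          (fun st j => (wr st.1 t j st.2.2, wr st.2.1 t j st.2.2, st.2.2 + 1)) (b, m, a0)).1 ∧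
       Grid n ((PySem.List.pyRange 0 (v : Int) 1).foldl
          (fun st j => (wr st.1 t j st.2.2, wr st.2.1 t j st.2.2, st.2.2 + 1)) (b, m, a0)).2.1 ∧
       ((PySem.List.pyRange 0 (v : Int) 1).foldl
          (fun st j => (wr st.1 t j st.2.2, wr st.2.1 t j st.2.2, st.2.2 + 1)) (b, m, a0)).2.2 = a0 + v ∧
       (∀ p q : Int, Sq n p q → p ≠ t →
          rd ((PySem.List.pyRange 0 (v : Int) 1).foldl
            (fun st j => (wr st.1 t j st.2.2, wr st.2.1 t j st.2.2, st.2.2 + 1)) (b, m, a0)).1 p q = rd b p q ∧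
          rd ((PySem.List.pyRange 0 (v : Int) 1).foldl
            (fun st j => (wr st.1 t j st.2.2, wr st.2.1 t j st.2.2, st.2.2 + 1)) (b, m, a0)).2.1 p q = rd m p q) ∧
       (∀ j : Int, 0 ≤ j → j < (v : Int) →
          rd ((PySem.List.pyRange 0 (v : Int) 1).foldl
            (fun st j => (wr st.1 t j st.2.2, wr st.2.1 t j st.2.2, st.2.2 + 1)) (b, m, a0)).1 t j = a0 + j ∧
          rd ((PySem.List.pyRange 0 (v : Int) 1).foldl
            (fun st j => (wr st.1 t j st.2.2, wr st.2.1 t j st.2.2, st.2.2 + 1)) (b, m, a0)).2.1 t j = a0 + j)) := by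
  intro v
  induction v with
  | zero =>
    intro _ b m a0 hb hm
    rw [show ((0 : Nat) : Int) = 0 by rfl, PySem.List.pyRange_one_eq_nil (le_refl 0)]
    simp only [List.foldl_nil]
    refine ⟨hb, hm, ?_, ?_, ?_⟩
    · simp
    · intro p q _ _
      exact ⟨trivial, trivial⟩
    · intro j h0 h1
      exact absurd h1 (by omega)
  | succ v ih =>
    intro hv b m a0 hb hm
    have hcast : ((v + 1 : Nat) : Int) = (v : Int) + 1 := by push_cast; ring
    rw [hcast, PySem.List.pyRange_one_succ_right (by positivity), List.foldl_append]
    obtain ⟨hB, hM, hA, hold, hnew⟩ := ih (by omega) b m a0 hb hm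
    set r := (PySem.List.pyRange 0 (v : Int) 1).foldl
      (fun st j => (wr st.1 t j st.2.2, wr st.2.1 t j st.2.2, st.2.2 + 1)) (b, m, a0) with hr
    simp only [List.foldl_cons, List.foldl_nil]
    have hsqt : Sq n t (v : Int) := ⟨ht0, ht1, by positivity, by omega⟩
    refine ⟨wr_Grid n hB hsqt _, wr_Grid n hM hsqt _, by simp [hA]; push_cast; ring, ?_, ?_⟩
    · intro p q hpq hpt
      constructor
      · rw [rd_wr n hB hsqt _ hpq, if_neg (by tauto)]
        exact (hold p q hpq hpt).1
      · rw [rd_wr n hM hsqt _ hpq, if_neg (by tauto)]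
        exact (hold p q hpq hpt).2
    · intro j hj0 hj1
      have hsqj : Sq n t j := ⟨ht0, ht1, hj0, by omega⟩
      by_cases hjv : j = (v : Int)
      · subst hjv
        constructor
        · rw [rd_wr n hB hsqt _ hsqj, if_pos ⟨rfl, rfl⟩, hA]
        · rw [rd_wr n hM hsqt _ hsqj, if_pos ⟨rfl, rfl⟩, hA]
      · constructor
        · rw [rd_wr n hB hsqt _ hsqj, if_neg (by tauto)]
          exact (hnew j hj0 (by omega)).1
        · rw [rd_wr n hM hsqt _ hsqj, if_neg (by tauto)]
          exact (hnew j hj0 (by omega)).2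

lemma fill_outer (n : Int) (hn : 0 < n) :
    ∀ (u : Nat), (u : Int) ≤ n →
      (Grid n ((PySem.List.pyRange 0 (u : Int) 1).foldl (fun st i =>
          (PySem.List.pyRange 0 n 1).foldl (fun st j =>
            (wr st.1 i j st.2.2, wr st.2.1 i j st.2.2, st.2.2 + 1)) st) (zeros n, zeros n, 0)).1 ∧
       Grid n ((PySem.List.pyRange 0 (u : Int) 1).foldl (fun st i =>
          (PySem.List.pyRange 0 n 1).foldl (fun st j =>
            (wr st.1 i j st.2.2, wr st.2.1 i j st.2.2, st.2.2 + 1)) st) (zeros n, zeros n, 0)).2.1 ∧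
       ((PySem.List.pyRange 0 (u : Int) 1).foldl (fun st i =>
          (PySem.List.pyRange 0 n 1).foldl (fun st j =>
            (wr st.1 i j st.2.2, wr st.2.1 i j st.2.2, st.2.2 + 1)) st) (zeros n, zeros n, 0)).2.2 = u * n ∧
       ∀ p q : Int, Sq n p q → p < (u : Int) →
          rd ((PySem.List.pyRange 0 (u : Int) 1).foldl (fun st i =>
            (PySem.List.pyRange 0 n 1).foldl (fun st j =>
              (wr st.1 i j st.2.2, wr st.2.1 i j st.2.2, st.2.2 + 1)) st) (zeros n, zeros n, 0)).1 p q = p * n + q ∧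
          rd ((PySem.List.pyRange 0 (u : Int) 1).foldl (fun st i =>
            (PySem.List.pyRange 0 n 1).foldl (fun st j =>
              (wr st.1 i j st.2.2, wr st.2.1 i j st.2.2, st.2.2 + 1)) st) (zeros n, zeros n, 0)).2.1 p q = p * n + q) := by
  intro u
  induction u with
  | zero =>
    intro _
    rw [show ((0 : Nat) : Int) = 0 by rfl, PySem.List.pyRange_one_eq_nil (le_refl 0)]
    simp only [List.foldl_nil]
    refine ⟨zeros_Grid n, zeros_Grid n, by simp, fun p q hsq h => ?_⟩
    obtain ⟨hp0, _, _, _⟩ := hsq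
    exact absurd h (by omega)
  | succ u ih =>
    intro hu
    have hcast : ((u + 1 : Nat) : Int) = (u : Int) + 1 := by push_cast; ring
    rw [hcast, PySem.List.pyRange_one_succ_right (by positivity), List.foldl_append]
    obtain ⟨hB, hM, hA, hprev⟩ := ih (by omega)
    set r := (PySem.List.pyRange 0 (u : Int) 1).foldl (fun st i =>
      (PySem.List.pyRange 0 n 1).foldl (fun st j =>
        (wr st.1 i j st.2.2, wr st.2.1 i j st.2.2, st.2.2 + 1)) st) (zeros n, zeros n, 0) with hr
    simp only [List.foldl_cons, List.foldl_nil]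
    have hnn : n = ((n.toNat : Nat) : Int) := by omega
    have hinner := fill_inner n hn (u : Int) (by positivity) (by omega) n.toNat
      (by omega) r.1 r.2.1 r.2.2 hB hM
    rw [← hnn] at hinner
    have hstate : (r.1, r.2.1, r.2.2) = r := rfl
    rw [hstate] at hinner
    obtain ⟨hB', hM', hA', hold', hnew'⟩ := hinner
    refine ⟨hB', hM', ?_, ?_⟩
    · rw [hA', hA]; push_cast; ring
    · intro p q hpq hplt
      obtain ⟨hp0, hp1, hq0, hq1⟩ := hpq
      by_cases hpu : p = (u : Int)
      · subst hpu
        have := hnew' q hq0 (by omega)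
        rw [hA] at this
        constructor
        · rw [this.1]
        · rw [this.2]
      · have hlt : p < (u : Int) := by omega
        obtain ⟨h1, h2⟩ := hold' p q ⟨hp0, hp1, hq0, hq1⟩ hpu
        rw [h1, h2]
        exact ⟨(hprev p q ⟨hp0, hp1, hq0, hq1⟩ hlt).1, (hprev p q ⟨hp0, hp1, hq0, hq1⟩ hlt).2⟩

lemma fillA_char (n : Int) (hn : 0 < n) :
    Grid n (fillA n).1 ∧ Grid n (fillA n).2.1 ∧
    ∀ p q : Int, Sq n p q →
      rd (fillA n).1 p q = p * n + q ∧ rd (fillA n).2.1 p q = p * n + q := by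
  have hnn : n = ((n.toNat : Nat) : Int) := by omega
  have h := fill_outer n hn n.toNat (by omega)
  rw [← hnn] at h
  obtain ⟨h1, h2, _, h4⟩ := h
  rw [fillA]
  exact ⟨h1, h2, fun p q hpq => h4 p q hpq (by obtain ⟨_, h, _, _⟩ := hpq; omega)⟩

-- ===== lockstep =====

lemma lockstep (n : Int) (hn2 : 2 ≤ n) {bazna : List (List Int)}
    (hbz : Grid n bazna) (hbr : ∀ i j, Sq n i j → rd bazna i j = i * n + j) :
    ∀ (f : Nat) (k : Nat) (m no : List (List Int)) (st : Int × Int × Int × Int) (c : Int),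
      InvA n k m → Grid n no → InvB n (k + 1) st →
      loopA n bazna (f + 1) m no c = loopB n f st (c + 1) := by
  have hn : 0 < n := by omega
  intro f
  induction f with
  | zero =>
    intro k m no st c hA hno hB
    simp only [loopA, loopB]
    split <;> rfl
  | succ f ih =>
    intro k m no st c hA hno hB
    have hA' : InvA n (k + 1) (stepA n m no) := stepA_char n hn hA hno
    by_cases hcond : ∀ i j, Sq n i j → sigIt n (k + 1) (i, j) = (i, j)
    · have hAeq : stepA n m no = bazna := (condA_iff n hn hA' hbz hbr).mpr hcond
      have hBeq : st = (1, 0, 0, 1) := (condB_iff n hn2 hB).mpr hcond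
      simp only [loopA, loopB]
      rw [if_pos hAeq, if_pos hBeq]
    · have hAne : stepA n m no ≠ bazna := fun h => hcond ((condA_iff n hn hA' hbz hbr).mp h)
      have hBne : st ≠ (1, 0, 0, 1) := fun h => hcond ((condB_iff n hn2 hB).mp h)
      simp only [loopA, loopB]
      rw [if_neg hAne, if_neg hBne]
      have := ih (k + 1) (copyA n (stepA n m no) m) (stepA n m no)
        (matStep n st.1 st.2.1 st.2.2.1 st.2.2.2) (c + 1)
        (copyA_char n hn hA' hA.1) hA'.1 (matStep_char n hn hB)
      simpa using this

-- ===== VERDICT (by name: the statement is the Claim_ definition above) =====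
theorem identiteta_spec : Claim_equal_identiteta := by
  unfold Claim_equal_identiteta Spec_identiteta
  intro n _
  rcases le_or_gt n 0 with h0 | hpos
  · have hr : PySem.List.pyRange 0 n 1 = [] := PySem.List.pyRange_one_eq_nil h0
    have ht : n.toNat = 0 := Int.toNat_of_nonpos h0
    simp [identiteta, fillA, zeros, stepA, loopA, identiteta_alt, hr, ht,
      if_pos (by omega : n ≤ 1)]
  · by_cases h1 : n = 1
    · subst h1; decide
    · have hn2 : 2 ≤ n := by omega
      have hn : 0 < n := by omega
      obtain ⟨hbz, hm, hrd⟩ := fillA_char n hn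
      rw [identiteta, identiteta_alt, if_neg (by omega : ¬ n ≤ 1)]
      apply lockstep n hn2 hbz (fun i j hij => (hrd i j hij).1) (n.toNat ^ 4) 0
        _ _ _ 0
      · exact ⟨hm, fun i j hij => by simpa [sigIt] using (hrd i j hij).2⟩
      · exact zeros_Grid n
      · rw [PySem.Int.mod_eq_emod_of_pos hn]
        refine ⟨⟨Int.emod_nonneg _ (by omega), Int.emod_lt_of_pos _ hn,
          by show (0:Int) ≤ 1; omega, by show (1:Int) < n; omega,
          by show (0:Int) ≤ 1; omega, by show (1:Int) < n; omega,
          by show (0:Int) ≤ 1; omega, by show (1:Int) < n; omega⟩, ?_⟩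
        intro i j hij
        show sig n (i, j) = _
        rw [sig_eq n hn]
        simp only
        have hX : (2 % n) ≡ 2 [ZMOD n] := Int.emod_emod 2 n
        refine Prod.ext ?_ ?_
        · show (2 * i + j) % n = (2 % n * i + 1 * j) % n
          calc (2 * i + j) % n = (2 * i + 1 * j) % n := by ring_nf
            _ = (2 % n * i + 1 * j) % n := ((hX.mul_right i).add (Int.ModEq.refl (1 * j))).symm
        · show (i + j) % n = (1 * i + 1 * j) % n
          rw [one_mul, one_mul]
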